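-- pv_equiv track=rewrite | github.com/dmanral/leetcode | RandomQuestions/test.py | reduceGifts
-- ===== SOURCE A (Python) =====
-- def reduceGifts(prices, k, threshold):
--     # Sort the prices in descending order
--     prices.sort(reverse=True)
--
--     # Start with the first k items and their sum
--     current_sum = sum(prices[:k])
--     removed_items_count = 0
--
--     # Start by checking if the initial sum is already under the threshold
--     if current_sum <= threshold:
--         return removed_items_count
--
--     # Iterate through the list to find the minimum items to remove
--     for i in range(len(prices)):
--         current_sum -= prices[i]
--         removed_items_count += 1
--
--         # Check the sum of the next k items
--         if i + k < len(prices):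
--             current_sum += prices[i + k]
--
--         # Break if the condition is met
--         if current_sum <= threshold:
--             break
--
--     return removed_items_count
-- ===== SOURCE B (Python) =====
-- def reduceGifts(prices, k, threshold):
--     # Same in-place descending sort side effect as the original
--     prices.sort(reverse=True)
--     n = len(prices)
--     # prefix sums: pre[j] = sum of the j largest prices
--     pre = [0]
--     s = 0
--     for p in prices:
--         s += p
--         pre.append(s)
--     # smallest r with sum of the k largest remaining (window [r, r+k)) <= threshold
--     for r in range(n + 1):
--         if pre[min(r + k, n)] - pre[r] <= threshold:
--             return r
--     return n
-- ===== Notes on version B (the rewrite author's own statement) =====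
-- stated objective: alternative
-- what changed: B replaces A's incrementally maintained sliding window sum (subtract prices[i], add prices[i+k]) with a prefix-sum table built once, then scans r = 0..n for the first r with pre[min(r+k,n)] - pre[r] <= threshold, folding A's separate r=0 early return into the same scan.
-- outside the precondition, e.g. on reduceGifts([1, 4, -5, 2, 4], -2, 3): A returns 2, B returns 1; on reduceGifts([2], -3, -1): A raises IndexError, B raises IndexError
import Mathlib
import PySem

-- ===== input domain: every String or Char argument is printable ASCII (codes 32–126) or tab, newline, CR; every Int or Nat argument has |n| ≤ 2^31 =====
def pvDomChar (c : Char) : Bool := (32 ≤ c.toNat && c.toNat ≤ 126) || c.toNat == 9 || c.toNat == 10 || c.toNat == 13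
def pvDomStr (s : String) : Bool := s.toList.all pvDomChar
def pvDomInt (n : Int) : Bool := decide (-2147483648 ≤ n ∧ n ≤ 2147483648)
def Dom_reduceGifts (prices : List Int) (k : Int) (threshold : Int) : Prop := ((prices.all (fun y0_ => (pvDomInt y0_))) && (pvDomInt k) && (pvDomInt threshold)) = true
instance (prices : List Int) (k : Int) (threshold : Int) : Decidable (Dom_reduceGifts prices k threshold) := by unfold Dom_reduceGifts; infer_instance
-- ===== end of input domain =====

-- B replaces A's incrementally maintained sliding-window sum with a prefix-sum table and a
-- single scan for the first satisfying removal count (objective: alternative, same cost).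
-- A sorts `prices` in place (observable mutation); B performs the same sort. Equivalence here
-- is about the return value.

-- ===== PORT A =====
-- the for-loop over range(len(prices)) with early break
def aLoop (ps : List Int) (k threshold : Int) (idxs : List Int) (cur cnt : Int) : Int :=
  match idxs with
  | [] => cnt
  | i :: rest =>
    let cur1 := cur - PySem.List.pyGetD ps i 0
    let cnt1 := cnt + 1
    let cur2 := if i + k < (ps.length : Int) then cur1 + PySem.List.pyGetD ps (i + k) 0 else cur1
    if cur2 ≤ threshold then cnt1 else aLoop ps k threshold rest cur2 cnt1

def reduceGifts (prices : List Int) (k : Int) (threshold : Int) : Int :=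
  let ps := PySem.List.sorted prices (fun x => x) true
  let currentSum := (PySem.List.slice ps none (some k)).sum
  if currentSum ≤ threshold then 0
  else aLoop ps k threshold (PySem.List.pyRange 0 (ps.length : Int) 1) currentSum 0

-- ===== PORT B =====
-- pre = [0]; s = 0; for p in prices: s += p; pre.append(s)
def bPre (ps : List Int) : List Int :=
  (ps.foldl (fun (st : List Int × Int) p => (st.1 ++ [st.2 + p], st.2 + p)) ([0], 0)).1

-- for r in range(n+1): if pre[min(r+k, n)] - pre[r] <= threshold: return r  / fallback n
def bFind (pre : List Int) (n k threshold : Int) (rs : List Int) : Int :=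
  match rs with
  | [] => n
  | r :: rest =>
    if PySem.List.pyGetD pre (min (r + k) n) 0 - PySem.List.pyGetD pre r 0 ≤ threshold then r
    else bFind pre n k threshold rest

def reduceGifts_alt (prices : List Int) (k : Int) (threshold : Int) : Int :=
  let ps := PySem.List.sorted prices (fun x => x) true
  let n : Int := ps.length
  bFind (bPre ps) n k threshold (PySem.List.pyRange 0 (n + 1) 1)

-- ===== PRECONDITION & SPEC =====
-- Pre_ restricts to the natural domain k ≥ 0 (k is a count of items): for negative k, A's
-- slice prices[:k] and negative-index access prices[i+k] are accidental (A raises IndexError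
-- when k < -len(prices), and otherwise returns values of Python's wraparound arithmetic).
def Pre_reduceGifts (prices : List Int) (k : Int) (threshold : Int) : Prop := 0 ≤ k
instance (prices : List Int) (k : Int) (threshold : Int) : Decidable (Pre_reduceGifts prices k threshold) := by unfold Pre_reduceGifts; infer_instance

def pvWitness_reduceGifts : List Int × Int × Int := ([5, 3, 2], 2, 6)

def Spec_reduceGifts (prices : List Int) (k : Int) (threshold : Int) (out : Int) : Prop := out = reduceGifts_alt prices k threshold
instance (prices : List Int) (k : Int) (threshold : Int) (out : Int) : Decidable (Spec_reduceGifts prices k threshold out) := by unfold Spec_reduceGifts; infer_instance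

-- ===== CLAIM (what is proved, stated in full; the proofs are below) =====
def Claim_equal_reduceGifts : Prop := ∀ (prices : List Int) (k : Int) (threshold : Int), Dom_reduceGifts prices k threshold → Pre_reduceGifts prices k threshold → Spec_reduceGifts prices k threshold (reduceGifts prices k threshold)

-- ===== LEMMAS AND PROOFS =====

-- reference: first r in [i, n] with window sum (ps[r:r+kn]).sum <= t, else n
def refGo (ps : List Int) (kn : Nat) (t : Int) (r : Nat) : Int :=
  if r < ps.length then
    if ((ps.drop r).take kn).sum ≤ t then (r : Int) else refGo ps kn t (r + 1)
  else (ps.length : Int)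
termination_by ps.length - r

theorem sum_take_succ (l : List Int) (m : Nat) :
    (l.take (m+1)).sum = (l.take m).sum + (if m < l.length then l.getD m 0 else 0) := by
  by_cases hm : m < l.length
  · rw [if_pos hm, List.sum_take_succ l m hm]
    simp [List.getD, List.getElem?_eq_getElem hm]
  · rw [Nat.not_lt] at hm
    rw [List.take_of_length_le hm, List.take_of_length_le (le_trans hm (by omega)),
      if_neg (Nat.not_lt.mpr hm)]
    simp

theorem step_sum (ps : List Int) (kn i : Nat) (h : i < ps.length) :
    ((ps.drop i).take kn).sum - ps.getD i 0
      + (if i + kn < ps.length then ps.getD (i + kn) 0 else 0)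
      = ((ps.drop (i + 1)).take kn).sum := by
  rw [List.drop_eq_getElem_cons h]
  cases kn with
  | zero => simp [List.getD, h]
  | succ m =>
    rw [List.take_succ_cons, sum_take_succ (ps.drop (i+1)) m]
    have h1 : (ps.drop (i+1)).getD m 0 = ps.getD (i+1+m) 0 := by
      simp [List.getD, List.getElem?_drop]
    have h2 : (m < (ps.drop (i+1)).length) ↔ (i + (m+1) < ps.length) := by
      simp [List.length_drop]; omega
    have h3 : ps.getD i 0 = ps[i] := by simp [List.getD, List.getElem?_eq_getElem h]
    rw [h1]
    by_cases hc : i + (m+1) < ps.length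
    · rw [if_pos hc, if_pos (h2.mpr hc)]
      have h4 : i + 1 + m = i + (m + 1) := by omega
      rw [h4, h3]; simp [List.sum_cons]
    · rw [if_neg hc, if_neg (fun hh => hc (h2.mp hh)), h3]
      simp [List.sum_cons]

theorem aLoop_eq (ps : List Int) (k t : Int) (hk : 0 ≤ k) (i : Nat) (hi : i ≤ ps.length) :
    aLoop ps k t (PySem.List.pyRange (i : Int) (ps.length : Int) 1)
      (((ps.drop i).take k.toNat).sum) (i : Int)
      = refGo ps k.toNat t (i + 1) := by
  have hkk : k = (k.toNat : Int) := (Int.toNat_of_nonneg hk).symm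
  suffices H : ∀ m i, i ≤ ps.length → ps.length - i = m →
      aLoop ps k t (PySem.List.pyRange (i : Int) (ps.length : Int) 1)
        (((ps.drop i).take k.toNat).sum) (i : Int) = refGo ps k.toNat t (i + 1) by
    exact H _ i hi rfl
  intro m
  induction m with
  | zero =>
    intro i hi hm
    have hieq : i = ps.length := by omega
    rw [PySem.List.pyRange_one_eq_nil (by exact_mod_cast Nat.cast_le.mpr (le_of_eq hieq.symm))]
    rw [refGo]
    rw [if_neg (by omega)]
    simp [aLoop, hieq]
  | succ m ih =>
    intro i hi hm
    have hlt : i < ps.length := by omega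
    rw [PySem.List.pyRange_one_cons (by exact_mod_cast hlt)]
    simp only [aLoop]
    have hg1 : PySem.List.pyGetD ps (i : Int) 0 = ps.getD i 0 := PySem.List.pyGetD_natCast ps i 0
    have hg2 : PySem.List.pyGetD ps ((i : Int) + k) 0 = ps.getD (i + k.toNat) 0 := by
      rw [hkk]; exact_mod_cast PySem.List.pyGetD_natCast ps (i + k.toNat) 0
    have hcond : ((i : Int) + k < (ps.length : Int)) ↔ (i + k.toNat < ps.length) := by omega
    have hcur2 : (if (i : Int) + k < (ps.length : Int) then
          ((ps.drop i).take k.toNat).sum - PySem.List.pyGetD ps (i : Int) 0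
            + PySem.List.pyGetD ps ((i : Int) + k) 0
        else ((ps.drop i).take k.toNat).sum - PySem.List.pyGetD ps (i : Int) 0)
        = ((ps.drop (i + 1)).take k.toNat).sum := by
      rw [hg1, hg2, ← step_sum ps k.toNat i hlt]
      by_cases hc : i + k.toNat < ps.length
      · rw [if_pos (hcond.mpr hc), if_pos hc]
      · rw [if_neg (fun hh => hc (hcond.mp hh)), if_neg hc]; ring
    rw [hcur2]
    rw [refGo]
    by_cases hlt1 : i + 1 < ps.length
    · rw [if_pos hlt1]
      by_cases hle : ((ps.drop (i + 1)).take k.toNat).sum ≤ t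
      · rw [if_pos hle, if_pos hle]; push_cast; ring
      · rw [if_neg hle, if_neg hle]
        have := ih (i + 1) (by omega) (by omega)
        rw [← this]
        norm_cast
    · rw [if_neg hlt1]
      have hieq : i + 1 = ps.length := by omega
      have hdrop : ((ps.drop (i + 1)).take k.toNat).sum = 0 := by
        rw [hieq, List.drop_length]; simp
      rw [hdrop]
      by_cases hle : (0 : Int) ≤ t
      · rw [if_pos hle]; exact_mod_cast congrArg (Nat.cast (R := Int)) hieq
      · rw [if_neg hle]
        rw [PySem.List.pyRange_one_eq_nil (by omega)]
        simp [aLoop]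
        exact_mod_cast congrArg (Nat.cast (R := Int)) hieq

theorem bPreGo (ps : List Int) : ∀ (acc : List Int) (s : Int),
    ps.foldl (fun (st : List Int × Int) p => (st.1 ++ [st.2 + p], st.2 + p)) (acc, s)
      = (acc ++ (List.range ps.length).map (fun j => s + (ps.take (j+1)).sum), s + ps.sum) := by
  induction ps with
  | nil => intro acc s; simp
  | cons p ps ih =>
    intro acc s
    simp only [List.foldl_cons]
    rw [ih]
    rw [Prod.mk.injEq]
    refine ⟨?_, by simp [List.sum_cons]; ring⟩
    simp [List.range_succ_eq_map, List.map_map, Function.comp_def, List.take_succ_cons,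
      List.append_assoc]
    intro a _
    ring

theorem bPre_eq (ps : List Int) :
    bPre ps = (List.range (ps.length + 1)).map (fun j => (ps.take j).sum) := by
  unfold bPre
  rw [bPreGo]
  simp [List.range_succ_eq_map, List.map_map, Function.comp_def]

theorem pre_get (ps : List Int) (j : Nat) (hj : j ≤ ps.length) :
    PySem.List.pyGetD (bPre ps) (j : Int) 0 = (ps.take j).sum := by
  rw [PySem.List.pyGetD_natCast, bPre_eq]
  simp [List.getD, List.getElem?_map, List.getElem?_range (by omega : j < ps.length + 1)]

theorem window_eq (ps : List Int) (kn i : Nat) :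
    (ps.take (min (i + kn) ps.length)).sum - (ps.take i).sum
      = ((ps.drop i).take kn).sum := by
  have h1 : ps.take (min (i + kn) ps.length) = ps.take (i + kn) := by
    by_cases h : i + kn ≤ ps.length
    · rw [min_eq_left h]
    · rw [min_eq_right (by omega), List.take_length, List.take_of_length_le (by omega)]
  rw [h1, List.take_add, List.sum_append]
  ring

theorem bFind_eq (ps : List Int) (k t : Int) (hk : 0 ≤ k) (i : Nat) (hi : i ≤ ps.length) :
    bFind (bPre ps) (ps.length : Int) k t
      (PySem.List.pyRange (i : Int) ((ps.length : Int) + 1) 1)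
      = refGo ps k.toNat t i := by
  have hkk : k = (k.toNat : Int) := (Int.toNat_of_nonneg hk).symm
  suffices H : ∀ m i, i ≤ ps.length → ps.length - i = m →
      bFind (bPre ps) (ps.length : Int) k t
        (PySem.List.pyRange (i : Int) ((ps.length : Int) + 1) 1)
        = refGo ps k.toNat t i by
    exact H _ i hi rfl
  intro m
  induction m with
  | zero =>
    intro i hi hm
    have hieq : i = ps.length := by omega
    subst hieq
    rw [PySem.List.pyRange_one_cons (by omega)]
    simp only [bFind]
    have hmin : min ((ps.length : Int) + k) (ps.length : Int)
        = ((min (ps.length + k.toNat) ps.length : Nat) : Int) := by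
      push_cast; omega
    rw [hmin, pre_get ps _ (by omega), pre_get ps ps.length (le_refl _), window_eq, refGo,
      if_neg (lt_irrefl _)]
    have hdrop : ((ps.drop ps.length).take k.toNat).sum = 0 := by
      rw [List.drop_length]; simp
    rw [hdrop]
    by_cases hle : (0 : Int) ≤ t
    · rw [if_pos hle]
    · rw [if_neg hle, PySem.List.pyRange_one_eq_nil (by omega)]
      simp [bFind]
  | succ m ih =>
    intro i hi hm
    have hlt : i < ps.length := by omega
    rw [PySem.List.pyRange_one_cons (by omega)]
    simp only [bFind]
    have hmin : min ((i : Int) + k) (ps.length : Int) = ((min (i + k.toNat) ps.length : Nat) : Int) := by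
      push_cast; omega
    rw [hmin, pre_get ps _ (by omega), pre_get ps i hi, window_eq, refGo, if_pos hlt]
    by_cases hle : ((ps.drop i).take k.toNat).sum ≤ t
    · rw [if_pos hle, if_pos hle]
    · rw [if_neg hle, if_neg hle]
      have := ih (i + 1) (by omega) (by omega)
      rw [← this]
      norm_cast

theorem core_eq (ps : List Int) (k t : Int) (hk : 0 ≤ k) :
    (if (PySem.List.slice ps none (some k)).sum ≤ t then 0
     else aLoop ps k t (PySem.List.pyRange 0 (ps.length : Int) 1)
       ((PySem.List.slice ps none (some k)).sum) 0)
      = bFind (bPre ps) (ps.length : Int) k t (PySem.List.pyRange 0 ((ps.length : Int) + 1) 1) := by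
  have h0 : (PySem.List.slice ps none (some k)).sum = ((ps.drop 0).take k.toNat).sum := by
    rw [PySem.List.slice_to ps hk]; simp
  have hb := bFind_eq ps k t hk 0 (Nat.zero_le _)
  simp only [Nat.cast_zero] at hb
  rw [h0, hb]
  by_cases hle : ((ps.drop 0).take k.toNat).sum ≤ t
  · rw [if_pos hle, refGo]
    by_cases hn : 0 < ps.length
    · rw [if_pos hn, if_pos hle]; simp
    · rw [if_neg hn]; omega
  · rw [if_neg hle]
    have ha := aLoop_eq ps k t hk 0 (Nat.zero_le _)
    simp only [Nat.cast_zero] at ha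
    rw [ha]
    conv_rhs => rw [refGo]
    by_cases hn : 0 < ps.length
    · rw [if_pos hn, if_neg hle]
    · rw [if_neg hn]
      conv_lhs => rw [refGo]
      rw [if_neg (by omega)]

-- ===== VERDICT (by name: the statement is the Claim_ definition above) =====
theorem reduceGifts_spec : Claim_equal_reduceGifts := by
  intro prices k t _ hk
  unfold Spec_reduceGifts reduceGifts reduceGifts_alt
  exact core_eq _ k t hk
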